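-- pv_equiv track=rewrite | github.com/pureslurp/dk_pga_scoring | pga_dk_scoring.py | streaks_and_bonuses
-- ===== SOURCE A (Python) =====
-- def streaks_and_bonuses(r1, r2, r3, r4, par):
--     '''
--     Streak of 3 birdies or better = 3
--     Bogey Free Round = 3
--     All 4 Rounds Under 70 Strokes = 5
--     '''
--
--     if r3 is not None:
--         tot1 = par + sum(r1)
--         tot2 = par + sum(r2)
--         tot3 = par + sum(r3)
--         tot4 = par + sum(r4)
--         r_array = [r1, r2, r3, r4]
--
--         if tot1 < 70 and tot2 < 70 and tot3 < 70 and tot4 < 70: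
--             under_70_pts = 5
--         else:
--             under_70_pts = 0
--     else:
--         tot1 = par + sum(r1)
--         tot2 = par + sum(r2)
--         r_array = [r1, r2]
--
--         if tot1 < 70 and tot2 < 70:
--             under_70_pts = 5
--         else:
--             under_70_pts = 0
--
--     bogey_free = 0
--     for r in r_array:
--         for h in r:
--             if h > 0:
--                 bogey_streak_pts = 0
--                 break
--             else:
--                 bogey_streak_pts = 3
--         bogey_free += bogey_streak_pts
--
--     birdie_streak = 0
--     for r in r_array:
--         l1 = False
--         l2 = False
--         for h in r:
--             if h < 0 and l1 == False:
--                 l1 = True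
--             elif h < 0 and l1 == True and l2 == False:
--                 l2 = True
--             elif h < 0 and l1 == True and l2 == True:
--                 birdie_streak += 3
--                 l1 = False
--                 l2 = False
--             else:
--                 l1 = False
--                 l2 = False
--     return bogey_free + birdie_streak + under_70_pts
-- ===== SOURCE B (Python) =====
-- def streaks_and_bonuses(r1, r2, r3, r4, par):
--     '''Recursive fused scoring: one recursive descent over the rounds computes
--     (bogey_free, birdie_streak, all_under_70) together; within a round, a single
--     index-jump scan splits the holes into maximal sub-par runs and awards
--     3 * (run_length // 3) per run, while simultaneously detecting bogeys.
--     An empty round is scored as bogey-free on its own (A carries over the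
--     previous round's flag there; see the stated intended difference).'''
--     rounds = [r1, r2] if r3 is None else [r1, r2, r3, r4]
--     bf, bs, under = _score(rounds, par)
--     return bf + bs + (5 if under else 0)
--
-- def _score(rounds, par):
--     if not rounds:
--         return 0, 0, True
--     r = rounds[0]
--     bf, bs, under = _score(rounds[1:], par)
--     i, n, bogey, pts = 0, len(r), False, 0
--     while i < n:
--         if r[i] < 0:
--             j = i
--             while j < n and r[j] < 0:
--                 j += 1
--             pts += 3 * ((j - i) // 3)
--             i = j
--         else:
--             bogey = bogey or r[i] > 0
--             i += 1
--     return bf + (0 if bogey else 3), bs + pts, under and par + sum(r) < 70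
-- ===== Notes on version B (the rewrite author's own statement) =====
-- stated objective: alternative
-- what changed: B replaces A's three separate staged loops (break-based bogey scan, l1/l2 boolean birdie state machine, if-chain under-70 test) by one recursive descent over the rounds list that computes all three bonuses together, scoring each round in a single fused index-jump scan that splits holes into maximal sub-par runs and awards 3*(len//3) per run while detecting bogeys in the same pass.
-- intended difference: On inputs where some round after the first is the empty list and the nearest preceding nonempty round contains a bogey, A re-adds that stale round's 0 bogey-free flag for the empty round (leftover loop state), while B scores an empty round as bogey-free (+3), the intended reading since no bogey occurred. — e.g. on streaks_and_bonuses([1], [], none, none, 0): A returns 5, B returns 8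
import Mathlib
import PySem

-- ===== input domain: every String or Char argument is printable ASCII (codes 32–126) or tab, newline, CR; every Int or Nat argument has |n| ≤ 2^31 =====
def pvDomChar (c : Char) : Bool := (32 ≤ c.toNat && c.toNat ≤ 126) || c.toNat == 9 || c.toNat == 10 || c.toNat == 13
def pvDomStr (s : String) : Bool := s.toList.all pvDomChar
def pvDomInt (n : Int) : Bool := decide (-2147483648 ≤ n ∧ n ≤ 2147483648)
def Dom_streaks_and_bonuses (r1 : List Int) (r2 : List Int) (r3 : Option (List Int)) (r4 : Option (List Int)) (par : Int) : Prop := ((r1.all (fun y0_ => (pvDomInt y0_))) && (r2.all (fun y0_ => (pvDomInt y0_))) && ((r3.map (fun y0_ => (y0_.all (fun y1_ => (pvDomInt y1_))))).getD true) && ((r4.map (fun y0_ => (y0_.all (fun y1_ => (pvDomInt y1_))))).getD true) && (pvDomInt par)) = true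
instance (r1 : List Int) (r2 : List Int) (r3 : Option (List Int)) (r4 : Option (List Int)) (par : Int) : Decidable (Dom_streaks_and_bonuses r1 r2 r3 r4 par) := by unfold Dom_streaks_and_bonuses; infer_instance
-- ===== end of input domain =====

-- B computes all three bonuses in one recursive descent over the rounds list, scoring
-- each round by a single fused index-jump scan over maximal sub-par runs (3*(len//3)
-- per run) that detects bogeys in the same pass, instead of A's three staged loops with
-- a boolean flag machine (objective: alternative decomposition); on rounds left empty A
-- carries over the previous round's bogey-free flag, B scores an empty round as
-- bogey-free (stated as the intended difference D_ below).

-- ===== PORT A =====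
def pvSum (r : List Int) : Int := r.foldl (· + ·) 0

def pvBogeyInner : List Int → Int → Int
  | [], pts => pts
  | h :: t, _pts => if h > 0 then 0 else pvBogeyInner t 3

def pvBogeyStep (s : Int × Int) (r : List Int) : Int × Int :=
  let pts := pvBogeyInner r s.2
  (s.1 + pts, pts)

def pvBirdieStep (s : Int × Bool × Bool) (h : Int) : Int × Bool × Bool :=
  if h < 0 ∧ s.2.1 = false then (s.1, true, s.2.2)
  else if h < 0 ∧ s.2.1 = true ∧ s.2.2 = false then (s.1, true, true)
  else if h < 0 ∧ s.2.1 = true ∧ s.2.2 = true then (s.1 + 3, false, false)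
  else (s.1, false, false)

def pvBirdieRound (acc : Int) (r : List Int) : Int :=
  (r.foldl pvBirdieStep (acc, false, false)).1

def streaks_and_bonuses (r1 : List Int) (r2 : List Int) (r3 : Option (List Int)) (r4 : Option (List Int)) (par : Int) : Int :=
  let p : List (List Int) × Int :=
    match r3 with
    | some r3v =>
      -- Python raises TypeError on sum(r4) when r4 is None here; Pre_ excludes that
      let r4v := r4.getD []
      let tot1 := par + pvSum r1
      let tot2 := par + pvSum r2
      let tot3 := par + pvSum r3v
      let tot4 := par + pvSum r4v
      ([r1, r2, r3v, r4v],
        if tot1 < 70 ∧ tot2 < 70 ∧ tot3 < 70 ∧ tot4 < 70 then 5 else 0)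
    | none =>
      let tot1 := par + pvSum r1
      let tot2 := par + pvSum r2
      ([r1, r2], if tot1 < 70 ∧ tot2 < 70 then 5 else 0)
  -- initial pts 0 is arbitrary: Python's bogey_streak_pts is unbound before the first
  -- round and Python raises UnboundLocalError when r1 = []; Pre_ requires r1 ≠ []
  let bogey_free := (p.1.foldl pvBogeyStep (0, 0)).1
  let birdie_streak := p.1.foldl pvBirdieRound 0
  bogey_free + birdie_streak + p.2

-- ===== PORT B =====
-- the inner 'while j < n and r[j] < 0: j += 1' of _score: length of the leading sub-par run
def pvLead : List Int → Nat
  | [] => 0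
  | h :: t => if h < 0 then pvLead t + 1 else 0

theorem pvLead_pos (h : Int) (t : List Int) (hh : h < 0) : 0 < pvLead (h :: t) := by
  simp [pvLead, hh]

-- the outer index-jump while loop of _score over one round, as recursion on the remaining holes
def pvScanRound : List Int → Bool → Int → Bool × Int
  | [], bogey, pts => (bogey, pts)
  | h :: t, bogey, pts =>
    if hneg : h < 0 then
      pvScanRound ((h :: t).drop (pvLead (h :: t))) bogey (pts + 3 * ((pvLead (h :: t) : Int) / 3))
    else
      pvScanRound t (bogey || decide (h > 0)) pts
termination_by l _ _ => l.length
decreasing_by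
  · have := pvLead_pos h t hneg
    simp only [List.length_drop, List.length_cons]
    omega
  · simp

def pvScoreRounds : List (List Int) → Int → Int × Int × Bool
  | [], _ => (0, 0, true)
  | r :: rs, par =>
    let t := pvScoreRounds rs par
    let s := pvScanRound r false 0
    (t.1 + (if s.1 then 0 else 3), t.2.1 + s.2, t.2.2 && decide (par + r.sum < 70))

def streaks_and_bonuses_alt (r1 : List Int) (r2 : List Int) (r3 : Option (List Int)) (r4 : Option (List Int)) (par : Int) : Int :=
  let rounds : List (List Int) :=
    match r3 with
    | none => [r1, r2]
    -- Python B raises TypeError on len(None)/sum(None) when r4 is None and r3 is not; Pre_ excludes that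
    | some r3v => [r1, r2, r3v, r4.getD []]
  let s := pvScoreRounds rounds par
  s.1 + s.2.1 + (if s.2.2 then 5 else 0)

-- ===== PRECONDITION & SPEC =====
-- Pre_ excludes exactly the inputs where Python A raises: r1 = [] (UnboundLocalError:
-- bogey_streak_pts is read before assignment) and r3 given with r4 = None (TypeError on sum(None)).
def Pre_streaks_and_bonuses (r1 : List Int) (r2 : List Int) (r3 : Option (List Int)) (r4 : Option (List Int)) (par : Int) : Prop :=
  r1 ≠ [] ∧ (r3.isSome → r4.isSome)
instance (r1 : List Int) (r2 : List Int) (r3 : Option (List Int)) (r4 : Option (List Int)) (par : Int) : Decidable (Pre_streaks_and_bonuses r1 r2 r3 r4 par) := by unfold Pre_streaks_and_bonuses; infer_instance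

def pvWitness_streaks_and_bonuses : List Int × List Int × Option (List Int) × Option (List Int) × Int :=
  ([0, -1, -1, -1, 1], [0, 0], none, none, 68)

def pvDFlag : List (List Int) → Bool → Bool
  | [], _ => false
  | r :: t, b => if r.isEmpty then (b || pvDFlag t b) else pvDFlag t (decide (∃ h ∈ r, 0 < h))

-- On inputs where some round after the first is the empty list and the nearest preceding
-- nonempty round contains a bogey, A accidentally re-adds that round's leftover 0/3
-- bogey-free flag for the empty round (3 points too few), while B scores the empty
-- round as bogey-free (3 points), which is the intended reading (no bogey was made).
def D_streaks_and_bonuses (r1 : List Int) (r2 : List Int) (r3 : Option (List Int)) (r4 : Option (List Int)) (par : Int) : Prop :=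
  pvDFlag (r1 :: r2 :: (r3.elim [] (fun r3v => [r3v, r4.getD []]))) false = true
instance (r1 : List Int) (r2 : List Int) (r3 : Option (List Int)) (r4 : Option (List Int)) (par : Int) : Decidable (D_streaks_and_bonuses r1 r2 r3 r4 par) := by unfold D_streaks_and_bonuses; infer_instance

def Spec_streaks_and_bonuses (r1 : List Int) (r2 : List Int) (r3 : Option (List Int)) (r4 : Option (List Int)) (par : Int) (out : Int) : Prop := ¬ D_streaks_and_bonuses r1 r2 r3 r4 par → out = streaks_and_bonuses_alt r1 r2 r3 r4 par
instance (r1 : List Int) (r2 : List Int) (r3 : Option (List Int)) (r4 : Option (List Int)) (par : Int) (out : Int) : Decidable (Spec_streaks_and_bonuses r1 r2 r3 r4 par out) := by unfold Spec_streaks_and_bonuses; infer_instance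

def pvDiffWitness_streaks_and_bonuses : List Int × List Int × Option (List Int) × Option (List Int) × Int :=
  ([1], [], none, none, 0)
def pvDiffWitnessOut_streaks_and_bonuses : Int × Int := (5, 8)

-- ===== CLAIM (what is proved, stated in full; the proofs are below) =====
def Claim_unchanged_streaks_and_bonuses : Prop := ∀ (r1 : List Int) (r2 : List Int) (r3 : Option (List Int)) (r4 : Option (List Int)) (par : Int), Dom_streaks_and_bonuses r1 r2 r3 r4 par → Pre_streaks_and_bonuses r1 r2 r3 r4 par → Spec_streaks_and_bonuses r1 r2 r3 r4 par (streaks_and_bonuses r1 r2 r3 r4 par)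
def Claim_changed_streaks_and_bonuses : Prop := Dom_streaks_and_bonuses (pvDiffWitness_streaks_and_bonuses.1) (pvDiffWitness_streaks_and_bonuses.2.1) (pvDiffWitness_streaks_and_bonuses.2.2.1) (pvDiffWitness_streaks_and_bonuses.2.2.2.1) (pvDiffWitness_streaks_and_bonuses.2.2.2.2) ∧ Pre_streaks_and_bonuses (pvDiffWitness_streaks_and_bonuses.1) (pvDiffWitness_streaks_and_bonuses.2.1) (pvDiffWitness_streaks_and_bonuses.2.2.1) (pvDiffWitness_streaks_and_bonuses.2.2.2.1) (pvDiffWitness_streaks_and_bonuses.2.2.2.2) ∧ D_streaks_and_bonuses (pvDiffWitness_streaks_and_bonuses.1) (pvDiffWitness_streaks_and_bonuses.2.1) (pvDiffWitness_streaks_and_bonuses.2.2.1) (pvDiffWitness_streaks_and_bonuses.2.2.2.1) (pvDiffWitness_streaks_and_bonuses.2.2.2.2) ∧ streaks_and_bonuses (pvDiffWitness_streaks_and_bonuses.1) (pvDiffWitness_streaks_and_bonuses.2.1) (pvDiffWitness_streaks_and_bonuses.2.2.1) (pvDiffWitness_streaks_and_bonuses.2.2.2.1) (pvDiffWitness_streaks_and_bonuses.2.2.2.2)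 = pvDiffWitnessOut_streaks_and_bonuses.1 ∧ streaks_and_bonuses_alt (pvDiffWitness_streaks_and_bonuses.1) (pvDiffWitness_streaks_and_bonuses.2.1) (pvDiffWitness_streaks_and_bonuses.2.2.1) (pvDiffWitness_streaks_and_bonuses.2.2.2.1) (pvDiffWitness_streaks_and_bonuses.2.2.2.2) = pvDiffWitnessOut_streaks_and_bonuses.2 ∧ pvDiffWitnessOut_streaks_and_bonuses.1 ≠ pvDiffWitnessOut_streaks_and_bonuses.2
def Claim_exact_streaks_and_bonuses : Prop := ∀ (r1 : List Int) (r2 : List Int) (r3 : Option (List Int)) (r4 : Option (List Int)) (par : Int), Dom_streaks_and_bonuses r1 r2 r3 r4 par → Pre_streaks_and_bonuses r1 r2 r3 r4 par → D_streaks_and_bonuses r1 r2 r3 r4 par → streaks_and_bonuses r1 r2 r3 r4 par ≠ streaks_and_bonuses_alt r1 r2 r3 r4 par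

-- ===== LEMMAS AND PROOFS =====

def pvHasBogey (r : List Int) : Bool := r.any (fun h => decide (h > 0))

theorem hasBogey_decide (r : List Int) : (decide (∃ h ∈ r, 0 < h)) = pvHasBogey r := by
  apply Bool.eq_iff_iff.mpr
  simp [pvHasBogey]

-- pts value encoded by the "has a bogey" flag
def ptsB (b : Bool) : Int := if b then 0 else 3

-- number of empty rounds for which A re-adds a leftover bogey flag instead of 3
def pvBadCount : List (List Int) → Bool → Nat
  | [], _ => 0
  | r :: t, b => if r.isEmpty then (if b then 1 else 0) + pvBadCount t b else pvBadCount t (pvHasBogey r)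

theorem pvDFlag_eq_badCount (rs : List (List Int)) : ∀ b : Bool, (pvDFlag rs b = true ↔ pvBadCount rs b ≠ 0) := by
  induction rs with
  | nil => intro b; simp [pvDFlag, pvBadCount]
  | cons r t ih =>
    intro b
    by_cases he : r.isEmpty
    · cases b <;> simp [pvDFlag, pvBadCount, he, ih]
    · simp [pvDFlag, pvBadCount, he, ih, hasBogey_decide]

theorem bogeyInner_ne (r : List Int) (hr : r ≠ []) : ∀ pts : Int, pvBogeyInner r pts = ptsB (pvHasBogey r) := by
  induction r with
  | nil => simp at hr
  | cons h t ih =>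
    intro pts
    by_cases hh : h > 0
    · simp [pvBogeyInner, pvHasBogey, hh, ptsB]
    · cases t with
      | nil => simp [pvBogeyInner, pvHasBogey, hh, ptsB]
      | cons x xs =>
        rw [show pvBogeyInner (h :: x :: xs) pts = pvBogeyInner (x :: xs) 3 from by
              simp [pvBogeyInner, hh],
            ih (by simp) 3]
        simp [pvHasBogey, hh]

-- A's bogey fold vs the canonical per-round sum, with badCount correcting the empty-round quirk
theorem bogey_master (rs : List (List Int)) : ∀ (b : Bool) (bf : Int),
    (rs.foldl pvBogeyStep (bf, ptsB b)).1 + 3 * (pvBadCount rs b : Int)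
      = bf + ((rs.map (fun r => ptsB (pvHasBogey r))).sum) := by
  induction rs with
  | nil => intro b bf; simp [pvBadCount]
  | cons r t ih =>
    intro b bf
    by_cases he : r.isEmpty
    · have hr : r = [] := List.isEmpty_iff.mp he
      subst hr
      cases b with
      | false =>
        have h1 := ih false (bf + 3)
        simp only [ptsB] at h1 ⊢
        simp only [List.foldl_cons, pvBogeyStep, pvBogeyInner, pvBadCount, List.map_cons,
          List.sum_cons, pvHasBogey, List.any_nil, List.isEmpty_nil] at h1 ⊢
        simp at h1 ⊢
        omega
      | true =>
        have h1 := ih true bf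
        simp only [ptsB] at h1 ⊢
        simp only [List.foldl_cons, pvBogeyStep, pvBogeyInner, pvBadCount, List.map_cons,
          List.sum_cons, pvHasBogey, List.any_nil, List.isEmpty_nil] at h1 ⊢
        simp at h1 ⊢
        push_cast at h1 ⊢
        omega
    · have hr : r ≠ [] := by simpa [List.isEmpty_iff] using he
      simp only [List.foldl_cons, pvBogeyStep, bogeyInner_ne r hr, pvBadCount, if_neg he,
        List.map_cons, List.sum_cons]
      rw [ih (pvHasBogey r) (bf + ptsB (pvHasBogey r))]
      ring

-- proof-side run machine bridging A's flag machine and B's index-jump scan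
def pvRunStep (s : Int × Int) (h : Int) : Int × Int :=
  if h < 0 then (s.1, s.2 + 1) else (s.1 + 3 * (s.2 / 3), 0)

def pvRunRound (acc : Int) (r : List Int) : Int :=
  let s := r.foldl pvRunStep (acc, 0)
  s.1 + 3 * (s.2 / 3)

theorem birdie_inv (r : List Int) : ∀ (a run : Int) (l1 l2 : Bool), 0 ≤ run →
    (if l1 then (if l2 then (2:Int) else 1) else (if l2 then 1 else 0)) = run % 3 →
    (r.foldl pvBirdieStep (a + 3 * (run / 3), l1, l2)).1
      = (r.foldl pvRunStep (a, run)).1 + 3 * ((r.foldl pvRunStep (a, run)).2 / 3) := by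
  induction r with
  | nil => intro a run l1 l2 h0 henc; simp
  | cons h t ih =>
    intro a run l1 l2 h0 henc
    by_cases hh : h < 0
    · have hstep : pvRunStep (a, run) h = (a, run + 1) := by simp [pvRunStep, hh]
      rw [List.foldl_cons, List.foldl_cons, hstep]
      cases l1 with
      | false =>
        cases l2 with
        | false =>
          have hq : run % 3 = 0 := by have h' := henc; simp at h'; omega
          have hA : pvBirdieStep (a + 3 * (run / 3), false, false) h
              = (a + 3 * ((run + 1) / 3), true, false) := by
            simp [pvBirdieStep, hh]
            omega
          rw [hA]
          exact ih a (run + 1) true false (by omega) (by simp; omega)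
        | true =>
          have hq : run % 3 = 1 := by have h' := henc; simp at h'; omega
          have hA : pvBirdieStep (a + 3 * (run / 3), false, true) h
              = (a + 3 * ((run + 1) / 3), true, true) := by
            simp [pvBirdieStep, hh]
            omega
          rw [hA]
          exact ih a (run + 1) true true (by omega) (by simp; omega)
      | true =>
        cases l2 with
        | false =>
          have hq : run % 3 = 1 := by have h' := henc; simp at h'; omega
          have hA : pvBirdieStep (a + 3 * (run / 3), true, false) h
              = (a + 3 * ((run + 1) / 3), true, true) := by
            simp [pvBirdieStep, hh]
            omega
          rw [hA]
          exact ih a (run + 1) true true (by omega) (by simp; omega)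
        | true =>
          have hq : run % 3 = 2 := by have h' := henc; simp at h'; omega
          have hA : pvBirdieStep (a + 3 * (run / 3), true, true) h
              = (a + 3 * ((run + 1) / 3), false, false) := by
            simp [pvBirdieStep, hh]
            omega
          rw [hA]
          exact ih a (run + 1) false false (by omega) (by simp; omega)
    · have hstep : pvRunStep (a, run) h = (a + 3 * (run / 3), 0) := by
        simp [pvRunStep, hh]
      have hA : pvBirdieStep (a + 3 * (run / 3), l1, l2) h = (a + 3 * (run / 3), false, false) := by
        simp [pvBirdieStep, hh]
      rw [List.foldl_cons, List.foldl_cons, hstep, hA]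
      have := ih (a + 3 * (run / 3)) 0 false false (by omega) (by simp)
      simpa using this

theorem bird_round_eq (acc : Int) (r : List Int) : pvBirdieRound acc r = pvRunRound acc r := by
  have := birdie_inv r acc 0 false false (by omega) (by simp)
  simpa [pvBirdieRound, pvRunRound] using this

-- the first component of the run fold is affine in the accumulator
theorem run_offset (l : List Int) : ∀ (a c run : Int),
    l.foldl pvRunStep (a + c, run) = ((l.foldl pvRunStep (a, run)).1 + c, (l.foldl pvRunStep (a, run)).2) := by
  induction l with
  | nil => intro a c run; simp
  | cons h t ih =>
    intro a c run
    by_cases hh : h < 0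
    · simp only [List.foldl_cons, pvRunStep, if_pos hh]
      exact ih a c (run + 1)
    · simp only [List.foldl_cons, pvRunStep, if_neg hh]
      rw [show a + c + 3 * (run / 3) = (a + 3 * (run / 3)) + c by ring]
      exact ih (a + 3 * (run / 3)) c 0

theorem pvRunRound_acc (acc : Int) (r : List Int) : pvRunRound acc r = acc + pvRunRound 0 r := by
  have h := run_offset r 0 acc 0
  rw [zero_add] at h
  simp only [pvRunRound, h]
  ring

theorem lead_le (r : List Int) : pvLead r ≤ r.length := by
  induction r with
  | nil => simp [pvLead]
  | cons h t ih => by_cases hh : h < 0 <;> simp [pvLead, hh] <;> omega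

theorem take_lead_neg (r : List Int) : ∀ x ∈ r.take (pvLead r), x < 0 := by
  induction r with
  | nil => simp
  | cons h t ih =>
    by_cases hh : h < 0
    · simp only [pvLead, if_pos hh, List.take_succ_cons]
      intro x hx
      rcases List.mem_cons.mp hx with h1 | h2
      · omega
      · exact ih x h2
    · simp [pvLead, hh]

theorem drop_lead_head (r : List Int) :
    r.drop (pvLead r) = [] ∨ ∃ h' t', r.drop (pvLead r) = h' :: t' ∧ ¬ h' < 0 := by
  induction r with
  | nil => left; simp
  | cons h t ih =>
    by_cases hh : h < 0
    · simpa [pvLead, hh] using ih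
    · right; exact ⟨h, t, by simp [pvLead, hh], hh⟩

-- the run fold jumps over a leading all-negative prefix by incrementing the counter
theorem run_neg_prefix (l : List Int) : ∀ (p m : Int), (∀ x ∈ l, x < 0) →
    l.foldl pvRunStep (p, m) = (p, m + l.length) := by
  induction l with
  | nil => intro p m _; simp
  | cons h t ih =>
    intro p m hall
    have hh : h < 0 := hall h (by simp)
    simp only [List.foldl_cons, pvRunStep, if_pos hh]
    rw [ih p (m + 1) (fun x hx => hall x (by simp [hx]))]
    simp [List.length_cons]
    push_cast
    ring

-- the run machine restarted after the leading run: pvRunRound skips the lead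
theorem runRound_lead (r : List Int) (p : Int) :
    pvRunRound p r = pvRunRound (p + 3 * ((pvLead r : Int) / 3)) (r.drop (pvLead r)) := by
  conv_lhs => rw [show r = r.take (pvLead r) ++ r.drop (pvLead r) from (List.take_append_drop _ _).symm]
  unfold pvRunRound
  rw [List.foldl_append, run_neg_prefix (r.take (pvLead r)) p 0 (take_lead_neg r)]
  have hlen : (r.take (pvLead r)).length = pvLead r := by
    simp [List.length_take, Nat.min_eq_left (lead_le r)]
  rw [hlen]
  rcases drop_lead_head r with hnil | ⟨h', t', heq, hge⟩
  · rw [hnil]; simp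
  · rw [heq]
    simp only [List.foldl_cons, pvRunStep, if_neg hge]
    norm_num

-- hasBogey is unchanged by dropping the (all sub-par) lead
theorem hasBogey_drop_lead (r : List Int) : pvHasBogey r = pvHasBogey (r.drop (pvLead r)) := by
  conv_lhs => rw [show r = r.take (pvLead r) ++ r.drop (pvLead r) from (List.take_append_drop _ _).symm]
  unfold pvHasBogey
  rw [List.any_append]
  have : (r.take (pvLead r)).any (fun h => decide (h > 0)) = false := by
    simp only [List.any_eq_false, decide_eq_true_eq]
    intro x hx
    have := take_lead_neg r x hx
    omega
  rw [this]
  simp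

-- B's fused scan computes exactly (carried bogey flag, run-machine birdie points)
theorem scan_eq_run : ∀ (n : Nat) (r : List Int), r.length ≤ n → ∀ (b : Bool) (p : Int),
    pvScanRound r b p = (b || pvHasBogey r, pvRunRound p r) := by
  intro n
  induction n with
  | zero =>
    intro r hr b p
    have : r = [] := List.eq_nil_of_length_eq_zero (Nat.le_zero.mp hr)
    subst this
    simp [pvScanRound, pvHasBogey, pvRunRound]
  | succ n ih =>
    intro r hr b p
    cases r with
    | nil => simp [pvScanRound, pvHasBogey, pvRunRound]
    | cons h t =>
      by_cases hh : h < 0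
      · rw [show pvScanRound (h :: t) b p
              = pvScanRound ((h :: t).drop (pvLead (h :: t))) b (p + 3 * ((pvLead (h :: t) : Int) / 3)) from by
            rw [pvScanRound]; simp [hh]]
        have hk := pvLead_pos h t hh
        have hlen : ((h :: t).drop (pvLead (h :: t))).length ≤ n := by
          simp only [List.length_drop, List.length_cons] at *
          omega
        rw [ih _ hlen b _]
        rw [hasBogey_drop_lead (h :: t), runRound_lead (h :: t) p]
      · rw [show pvScanRound (h :: t) b p = pvScanRound t (b || decide (h > 0)) p from by
            rw [pvScanRound]; simp [hh]]
        have hlt : t.length ≤ n := by simp only [List.length_cons] at hr; omega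
        rw [ih t hlt _ p]
        have hb : ((b || decide (h > 0)) || pvHasBogey t) = (b || pvHasBogey (h :: t)) := by
          simp [pvHasBogey, Bool.or_assoc]
        have hrun : pvRunRound p (h :: t) = pvRunRound p t := by
          unfold pvRunRound
          simp only [List.foldl_cons, pvRunStep, if_neg hh]
          norm_num
        rw [hb, hrun]

theorem scan_fst (r : List Int) : (pvScanRound r false 0).1 = pvHasBogey r := by
  rw [scan_eq_run r.length r (le_refl _) false 0]
  simp

theorem scan_snd (r : List Int) : (pvScanRound r false 0).2 = pvRunRound 0 r := by
  rw [scan_eq_run r.length r (le_refl _) false 0]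

-- the main accounting identity: A's result plus 3 per quirk-hit empty round equals B's result
theorem bird_fold_eq (rs : List (List Int)) : ∀ acc : Int, rs.foldl pvBirdieRound acc = rs.foldl pvRunRound acc := by
  induction rs with
  | nil => intro acc; rfl
  | cons r t ih => intro acc; simp only [List.foldl_cons, bird_round_eq, ih]

theorem pvSum_eq (r : List Int) : pvSum r = r.sum := by
  simp [pvSum, List.sum_eq_foldl]

set_option maxHeartbeats 1600000 in
theorem master (r1 r2 : List Int) (r3 r4 : Option (List Int)) (par : Int) (h1 : r1 ≠ []) :
    streaks_and_bonuses r1 r2 r3 r4 par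
      + 3 * (pvBadCount (match r3 with | none => [r1, r2] | some r3v => [r1, r2, r3v, r4.getD []]) false : Int)
      = streaks_and_bonuses_alt r1 r2 r3 r4 par := by
  have he1 : r1.isEmpty = false := by simpa [List.isEmpty_iff] using h1
  have hfirstA : ∀ rest : List (List Int),
      ((r1 :: rest).foldl pvBogeyStep ((0 : Int), (0 : Int)))
        = (rest.foldl pvBogeyStep (ptsB (pvHasBogey r1), ptsB (pvHasBogey r1))) := by
    intro rest
    simp [List.foldl_cons, pvBogeyStep, bogeyInner_ne r1 h1]
  have hbad : ∀ rest : List (List Int),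
      pvBadCount (r1 :: rest) false = pvBadCount rest (pvHasBogey r1) := by
    intro rest; simp [pvBadCount, he1]
  cases r3 with
  | none =>
    have hbog := bogey_master [r2] (pvHasBogey r1) (ptsB (pvHasBogey r1))
    simp only [List.map_cons, List.map_nil, List.sum_cons, List.sum_nil, add_zero] at hbog
    simp only [streaks_and_bonuses, streaks_and_bonuses_alt, pvScoreRounds, scan_fst, scan_snd,
      bird_fold_eq]
    rw [hfirstA [r2], hbad [r2]]
    simp only [← pvSum_eq]
    simp only [List.foldl_cons, List.foldl_nil]
    rw [pvRunRound_acc (pvRunRound 0 r1) r2]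
    by_cases c1 : par + pvSum r1 < 70 <;> by_cases c2 : par + pvSum r2 < 70 <;>
      cases hB1 : pvHasBogey r1 <;> cases hB2 : pvHasBogey r2 <;>
      simp [c1, c2, hB1, hB2, ptsB] at hbog ⊢ <;>
      omega
  | some r3v =>
    have hbog := bogey_master [r2, r3v, r4.getD []] (pvHasBogey r1) (ptsB (pvHasBogey r1))
    simp only [List.map_cons, List.map_nil, List.sum_cons, List.sum_nil, add_zero] at hbog
    simp only [streaks_and_bonuses, streaks_and_bonuses_alt, pvScoreRounds, scan_fst, scan_snd,
      bird_fold_eq]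
    rw [hfirstA [r2, r3v, r4.getD []], hbad [r2, r3v, r4.getD []]]
    simp only [← pvSum_eq]
    simp only [List.foldl_cons, List.foldl_nil]
    rw [pvRunRound_acc (pvRunRound (pvRunRound (pvRunRound 0 r1) r2) r3v) (r4.getD []),
        pvRunRound_acc (pvRunRound (pvRunRound 0 r1) r2) r3v,
        pvRunRound_acc (pvRunRound 0 r1) r2]
    by_cases c1 : par + pvSum r1 < 70 <;> by_cases c2 : par + pvSum r2 < 70 <;>
      by_cases c3 : par + pvSum r3v < 70 <;> by_cases c4 : par + pvSum (r4.getD []) < 70 <;>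
      cases hB1 : pvHasBogey r1 <;> cases hB2 : pvHasBogey r2 <;>
      cases hB3 : pvHasBogey r3v <;> cases hB4 : pvHasBogey (r4.getD []) <;>
      simp [c1, c2, c3, c4, hB1, hB2, hB3, hB4, ptsB] at hbog ⊢ <;>
      omega

-- ===== VERDICT (by name: the statement is the Claim_ definition above) =====
theorem streaks_and_bonuses_spec : Claim_unchanged_streaks_and_bonuses := by
  intro r1 r2 r3 r4 par _hDom hPre hnD
  have hm := master r1 r2 r3 r4 par hPre.1
  unfold D_streaks_and_bonuses at hnD
  cases r3 with
  | none =>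
    have hz : pvBadCount [r1, r2] false = 0 := by
      by_contra hne
      exact hnD ((pvDFlag_eq_badCount [r1, r2] false).mpr hne)
    simp only [hz] at hm
    simpa using hm
  | some r3v =>
    have hz : pvBadCount [r1, r2, r3v, r4.getD []] false = 0 := by
      by_contra hne
      exact hnD ((pvDFlag_eq_badCount [r1, r2, r3v, r4.getD []] false).mpr hne)
    simp only [hz] at hm
    simpa using hm

theorem streaks_and_bonuses_changed : Claim_changed_streaks_and_bonuses := by
  unfold Claim_changed_streaks_and_bonuses
  refine ⟨by decide, by decide, by decide, by decide, ?_, by decide⟩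
  show streaks_and_bonuses_alt [1] [] none none 0 = (8 : Int)
  simp [streaks_and_bonuses_alt, pvScoreRounds, scan_fst, scan_snd, pvRunRound, pvRunStep,
    pvHasBogey]

theorem streaks_and_bonuses_tight : Claim_exact_streaks_and_bonuses := by
  intro r1 r2 r3 r4 par _hDom hPre hD heq
  have hm := master r1 r2 r3 r4 par hPre.1
  unfold D_streaks_and_bonuses at hD
  cases r3 with
  | none =>
    have hnz : pvBadCount [r1, r2] false ≠ 0 := (pvDFlag_eq_badCount [r1, r2] false).mp hD
    have hm' : streaks_and_bonuses r1 r2 none r4 par + 3 * (pvBadCount [r1, r2] false : Int)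
        = streaks_and_bonuses_alt r1 r2 none r4 par := hm
    rw [heq] at hm'
    omega
  | some r3v =>
    have hnz : pvBadCount [r1, r2, r3v, r4.getD []] false ≠ 0 :=
      (pvDFlag_eq_badCount [r1, r2, r3v, r4.getD []] false).mp hD
    have hm' : streaks_and_bonuses r1 r2 (some r3v) r4 par + 3 * (pvBadCount [r1, r2, r3v, r4.getD []] false : Int)
        = streaks_and_bonuses_alt r1 r2 (some r3v) r4 par := hm
    rw [heq] at hm'
    omega
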